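-- pv_equiv track=rewrite | github.com/codeprogredire/Python_Coding | 56.py | maxScore
-- ===== SOURCE A (Python) =====
-- def maxScore(a, m):
--     # Write your code here
--     MOD=10**9+7
--     a.sort()
--     n=len(a)
--     k=n//m
--     r=n%m
--     if r!=0:
--         k-=1
--         r+=m
--
--     i,j=1,0
--
--     score=0
--     while i<=k:
--         score=(score+(i*(sum(a[j:j+m])%MOD))%MOD)%MOD
--         i+=1
--         j+=m
--     if r!=0:
--         score=(score+(i*(sum(a[j:])%MOD))%MOD)%MOD
--
--     return score
--
-- a=[4,1,7,9]
--
-- m=4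
-- ===== SOURCE B (Python) =====
-- def maxScore(a, m):
--     # Suffix-sum/level decomposition: sort in place, then add the running
--     # suffix total once per weight level instead of weighting each group.
--     MOD = 10 ** 9 + 7
--     a.sort()
--     n = len(a)
--     q, r = divmod(n, m)
--     g = q if r == 0 else max(q - 1, 0) + 1
--     score = 0
--     running = sum(a)
--     for t in range(g):
--         score += running
--         running -= sum(a[t * m:(t + 1) * m])
--     return score % MOD
-- ===== Notes on version B (the rewrite author's own statement) =====
-- stated objective: alternative
-- what changed: Replaces A's while-loop that weights each m-sized slice by its group index (plus a separate tail step) with a suffix-sum level pass: one running suffix total is added once per weight level and a group sum is peeled off after each level, with a single final modulo.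
import Mathlib
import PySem

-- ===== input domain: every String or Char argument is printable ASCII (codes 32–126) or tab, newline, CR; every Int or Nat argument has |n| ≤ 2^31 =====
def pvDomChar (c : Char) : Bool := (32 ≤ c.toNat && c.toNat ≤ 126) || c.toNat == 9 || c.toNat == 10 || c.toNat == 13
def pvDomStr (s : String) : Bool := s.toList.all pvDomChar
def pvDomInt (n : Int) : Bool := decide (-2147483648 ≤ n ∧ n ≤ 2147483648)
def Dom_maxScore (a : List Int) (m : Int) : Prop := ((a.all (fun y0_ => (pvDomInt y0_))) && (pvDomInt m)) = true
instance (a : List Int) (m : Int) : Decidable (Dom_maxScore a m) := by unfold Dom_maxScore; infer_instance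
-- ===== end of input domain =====

-- B replaces A's weighted-group loop by a suffix-sum level pass (one modulo at the end);
-- the equivalence is about the RETURN value (both Pythons sort the argument in place).

-- ===== PORT A =====
-- A's 'while i <= k' loop: state (i, j, score), one recursive step per iteration
def maxScoreLoopA (s : List Int) (m M : Int) : Nat → Int × Int × Int → Int × Int × Int
  | 0, st => st
  | (fuel + 1), st =>
      maxScoreLoopA s m M fuel
        (st.1 + 1, st.2.1 + m,
          PySem.Int.mod
            (st.2.2 +
              PySem.Int.mod
                (st.1 * PySem.Int.mod (PySem.List.slice s (some st.2.1) (some (st.2.1 + m))).sum M) M) M)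

def maxScore (a : List Int) (m : Int) : Int :=
  let M : Int := 10 ^ 9 + 7
  let s := PySem.List.sorted a (fun x => x) false
  let n : Int := s.length
  let k0 := PySem.Int.floordiv n m
  let r0 := PySem.Int.mod n m
  let k := if r0 ≠ 0 then k0 - 1 else k0
  let r := if r0 ≠ 0 then r0 + m else r0
  let st := maxScoreLoopA s m M k.toNat (1, 0, 0)
  if r ≠ 0 then
    PySem.Int.mod
      (st.2.2 +
        PySem.Int.mod (st.1 * PySem.Int.mod (PySem.List.slice s (some st.2.1) none).sum M) M) M
  else st.2.2

-- ===== PORT B =====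
def maxScore_alt (a : List Int) (m : Int) : Int :=
  let M : Int := 10 ^ 9 + 7
  let s := PySem.List.sorted a (fun x => x) false
  let n : Int := s.length
  let q := PySem.Int.floordiv n m
  let r := PySem.Int.mod n m
  let g := if r = 0 then q else max (q - 1) 0 + 1
  let st := (PySem.List.pyRange 0 g 1).foldl
    (fun (st : Int × Int) t =>
      (st.1 + st.2, st.2 - (PySem.List.slice s (some (t * m)) (some ((t + 1) * m))).sum))
    (0, s.sum)
  PySem.Int.mod st.1 M

-- ===== PRECONDITION & SPEC =====
-- Pre_ excludes only m = 0, on which the Python A raises ZeroDivisionError (as does B).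
def Pre_maxScore (a : List Int) (m : Int) : Prop := m ≠ 0
instance (a : List Int) (m : Int) : Decidable (Pre_maxScore a m) := by unfold Pre_maxScore; infer_instance
def pvWitness_maxScore : List Int × Int := ([4, 1, 7, 9], 4)

def Spec_maxScore (a : List Int) (m : Int) (out : Int) : Prop := out = maxScore_alt a m
instance (a : List Int) (m : Int) (out : Int) : Decidable (Spec_maxScore a m out) := by unfold Spec_maxScore; infer_instance

-- ===== CLAIM (what is proved, stated in full; the proofs are below) =====
def Claim_equal_maxScore : Prop := ∀ (a : List Int) (m : Int), Dom_maxScore a m → Pre_maxScore a m → Spec_maxScore a m (maxScore a m)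

-- ===== LEMMAS AND PROOFS =====

-- suffix sum of s from Nat position x
def pvSfx (s : List Int) (x : Nat) : Int := (s.drop x).sum

theorem pv_modstep (M X i G : Int) : (X % M + (i * (G % M)) % M) % M = (X + i * G) % M := by
  conv_lhs => rw [Int.mul_emod, Int.emod_emod_of_dvd _ dvd_rfl, ← Int.mul_emod, ← Int.add_emod]

theorem pv_loopA (s : List Int) (m M : Int) (hM : 0 < M) :
    ∀ (fuel : Nat) (i j X : Int),
      maxScoreLoopA s m M fuel (i, j, X % M) =
        (i + fuel, j + fuel * m,
          (X + ∑ t ∈ Finset.range fuel,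
              (i + t) * (PySem.List.slice s (some (j + t * m)) (some (j + t * m + m))).sum) % M) := by
  intro fuel
  induction fuel with
  | zero => intro i j X; simp [maxScoreLoopA]
  | succ fuel ih =>
      intro i j X
      show maxScoreLoopA s m M fuel
        (i + 1, j + m,
          PySem.Int.mod (X % M +
              PySem.Int.mod (i * PySem.Int.mod (PySem.List.slice s (some j) (some (j + m))).sum M) M) M)
        = _
      rw [PySem.Int.mod_eq_emod_of_pos hM, PySem.Int.mod_eq_emod_of_pos hM,
          PySem.Int.mod_eq_emod_of_pos hM,
          pv_modstep M X i ((PySem.List.slice s (some j) (some (j + m))).sum)]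
      rw [ih (i + 1) (j + m) (X + i * (PySem.List.slice s (some j) (some (j + m))).sum)]
      refine Prod.ext ?_ (Prod.ext ?_ ?_)
      · push_cast; ring
      · push_cast; ring
      · simp only []
        congr 1
        rw [Finset.sum_range_succ']
        push_cast
        have hB : ∀ t ∈ Finset.range fuel,
            (i + ((t : Int) + 1)) *
                (PySem.List.slice s (some (j + ((t : Int) + 1) * m)) (some (j + ((t : Int) + 1) * m + m))).sum
              = (i + 1 + (t : Int)) *
                (PySem.List.slice s (some (j + m + (t : Int) * m)) (some (j + m + (t : Int) * m + m))).sum := by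
          intro t _
          have e : j + ((t : Int) + 1) * m = j + m + (t : Int) * m := by ring
          rw [e]; ring_nf
        rw [Finset.sum_congr rfl hB]
        ring_nf

theorem pv_sfx_split (s : List Int) (x y : Nat) :
    pvSfx s x = ((s.drop x).take y).sum + pvSfx s (x + y) := by
  unfold pvSfx
  conv_lhs => rw [← List.take_append_drop y (s.drop x)]
  rw [List.sum_append, List.drop_drop]

theorem pv_loopB (f : Nat → Int) : ∀ (G : Nat) (sc run : Int),
    ((List.range G).foldl (fun (st : Int × Int) t => (st.1 + st.2, st.2 - f t)) (sc, run)) =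
      (sc + ∑ t ∈ Finset.range G, (run - ∑ u ∈ Finset.range t, f u),
       run - ∑ u ∈ Finset.range G, f u) := by
  intro G
  induction G with
  | zero => intro sc run; simp
  | succ G ih =>
      intro sc run
      rw [List.range_succ, List.foldl_append, ih]
      refine Prod.ext ?_ ?_
      · simp only [List.foldl]
        rw [Finset.sum_range_succ]
        ring_nf
      · simp only [List.foldl]
        rw [Finset.sum_range_succ]
        ring_nf

theorem pv_abel (f : Nat → Int) : ∀ K : Nat,
    ∑ t ∈ Finset.range (K + 1), f t =
      (∑ t ∈ Finset.range K, ((t : Int) + 1) * (f t - f (t + 1))) + ((K : Int) + 1) * f K := by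
  intro K
  induction K with
  | zero => simp
  | succ K ih =>
      rw [Finset.sum_range_succ (f := f), ih, Finset.sum_range_succ]
      push_cast
      ring

theorem pv_sum_eq (F : Nat → Int) (K : Nat) (hK : F K = 0) :
    ∑ t ∈ Finset.range K, ((t : Int) + 1) * (F t - F (t + 1)) = ∑ t ∈ Finset.range K, F t := by
  cases K with
  | zero => simp
  | succ K =>
      rw [pv_abel F K, Finset.sum_range_succ ((fun t => ((t : Int) + 1) * (F t - F (t + 1)))), hK]
      ring

-- group sum in slice form equals a difference of suffix sums
theorem pv_slice_group (s : List Int) (mn t : Nat) :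
    (PySem.List.slice s (some ((t : Int) * (mn : Int))) (some ((t : Int) * (mn : Int) + (mn : Int)))).sum
      = pvSfx s (t * mn) - pvSfx s ((t + 1) * mn) := by
  have h1 : ((t : Int) * (mn : Int)) = (((t * mn : Nat)) : Int) := by push_cast; ring
  have h2 : ((t : Int) * (mn : Int) + (mn : Int)) = (((t * mn + mn : Nat)) : Int) := by push_cast; ring
  rw [h2, h1, PySem.List.slice_natCast]
  have h3 : t * mn + mn - (t * mn) = mn := by omega
  rw [h3]
  have h4 : (t + 1) * mn = t * mn + mn := by ring
  rw [h4]
  linarith [pv_sfx_split s (t * mn) mn]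

theorem pv_slice_group' (s : List Int) (mn t : Nat) :
    (PySem.List.slice s (some ((t : Int) * (mn : Int))) (some (((t : Int) + 1) * (mn : Int)))).sum
      = pvSfx s (t * mn) - pvSfx s ((t + 1) * mn) := by
  have e : (((t : Int) + 1) * (mn : Int)) = ((t : Int) * (mn : Int) + (mn : Int)) := by ring
  rw [e, pv_slice_group]

theorem pv_slice_suffix (s : List Int) (mn t : Nat) :
    (PySem.List.slice s (some ((t : Int) * (mn : Int))) none).sum = pvSfx s (t * mn) := by
  have h1 : ((t : Int) * (mn : Int)) = (((t * mn : Nat)) : Int) := by push_cast; ring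
  rw [h1, PySem.List.slice_from_natCast]
  rfl

-- ===== VERDICT (by name: the statement is the Claim_ definition above) =====
theorem maxScore_spec : Claim_equal_maxScore := by
  intro a m _ hm
  unfold Spec_maxScore
  simp only [maxScore, maxScore_alt]
  generalize PySem.List.sorted a (fun x => x) false = s
  have hM : (0:Int) < 10 ^ 9 + 7 := by norm_num
  rcases lt_or_gt_of_ne hm with hneg | hpos
  · -- m < 0
    have hqle : PySem.Int.floordiv (↑s.length) m ≤ 0 := by
      by_contra hgt
      have hgt : 0 < PySem.Int.floordiv (↑s.length) m := lt_of_not_ge hgt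
      have h1 := PySem.Int.floordiv_mul_add_mod (↑s.length) m
      have h2 := PySem.Int.mod_neg_bounds (a := ↑s.length) (b := m) hneg
      nlinarith [Int.natCast_nonneg s.length]
    by_cases h0 : PySem.Int.mod (↑s.length) m = 0
    · rw [if_neg (by simp [h0]), if_neg (by simp [h0])]
      rw [Int.toNat_of_nonpos (by simpa [h0] using hqle)]
      rw [if_pos h0, PySem.List.pyRange_one_eq_nil hqle]
      simp [maxScoreLoopA]
    · have hrb := PySem.Int.mod_neg_bounds (a := ↑s.length) (b := m) hneg
      have hrm : PySem.Int.mod (↑s.length) m + m ≠ 0 := by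
        rcases (lt_or_eq_of_le hrb.2) with h | h
        · omega
        · exact absurd h h0
      rw [if_pos h0, if_pos h0, if_pos hrm]
      rw [Int.toNat_of_nonpos (by omega)]
      rw [if_neg h0]
      have hg : max (PySem.Int.floordiv (↑s.length) m - 1) 0 + 1 = (1:Int) := by
        rw [max_eq_right (by omega)]
        norm_num
      have hpr : PySem.List.pyRange 0 1 1 = [0] := by decide
      rw [hg, hpr]
      simp only [maxScoreLoopA, List.foldl]
      rw [PySem.List.slice_zero_start, PySem.List.slice_none_none]
      simp only [PySem.Int.mod_eq_emod_of_pos hM]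
      simp [Int.emod_emod_of_dvd _ dvd_rfl]
  · -- 0 < m
    obtain ⟨mn, rfl⟩ : ∃ mn : Nat, m = (mn : Int) := ⟨m.toNat, (Int.toNat_of_nonneg hpos.le).symm⟩
    have hmn : 0 < mn := by exact_mod_cast hpos
    simp only [PySem.Int.mod_natCast, PySem.Int.floordiv_natCast]
    by_cases h0 : s.length % mn = 0
    · -- mn divides the length: no tail group
      simp only [h0, Nat.cast_zero]
      rw [if_neg (by simp), if_neg (by simp)]
      simp only [if_true]
      rw [Int.toNat_natCast]
      have hA := pv_loopA s (mn : Int) (10 ^ 9 + 7) hM (s.length / mn) 1 0 0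
      rw [Int.zero_emod] at hA
      rw [hA]
      try dsimp only
      simp only [PySem.Int.mod_eq_emod_of_pos hM]
      rw [PySem.List.pyRange_one]
      simp only [sub_zero, Int.toNat_natCast, List.foldl_map]
      try dsimp only
      simp only [zero_add]
      have hB := pv_loopB
        (fun t : Nat => (PySem.List.slice s (some ((t : Int) * (mn : Int))) (some (((t : Int) + 1) * (mn : Int)))).sum)
        (s.length / mn) 0 s.sum
      try dsimp only at hB
      rw [hB]
      try dsimp only
      simp only [zero_add, pv_slice_group, pv_slice_group']
      rw [show s.sum = pvSfx s 0 from by simp [pvSfx]]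
      simp only [Finset.sum_range_sub']
      simp only [Nat.zero_mul, sub_sub_cancel]
      congr 1
      rw [Finset.sum_congr rfl
        (fun t _ => by ring :
          ∀ t ∈ Finset.range (s.length / mn),
            (1 + (t : Int)) * (pvSfx s (t * mn) - pvSfx s ((t + 1) * mn))
              = ((t : Int) + 1) * (pvSfx s (t * mn) - pvSfx s ((t + 1) * mn)))]
      exact pv_sum_eq (fun t => pvSfx s (t * mn)) (s.length / mn)
        (by simp [pvSfx, Nat.div_mul_cancel (Nat.dvd_of_mod_eq_zero h0)])
    · -- a proper tail group
      have hrn0 : ((s.length % mn : Nat) : Int) ≠ 0 := by exact_mod_cast h0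
      rw [if_pos hrn0, if_pos hrn0, if_neg hrn0]
      rw [if_pos (by omega)]
      rcases Nat.eq_zero_or_pos (s.length / mn) with hq0 | hq0
      · -- fewer than mn elements: single level over the whole list
        rw [hq0]
        simp only [Nat.cast_zero]
        rw [show ((0:Int) - 1).toNat = 0 from rfl]
        simp only [maxScoreLoopA]
        rw [PySem.List.slice_zero_start, PySem.List.slice_none_none]
        rw [show max ((0:Int) - 1) 0 + 1 = 1 from by norm_num]
        have hpr : PySem.List.pyRange 0 1 1 = [0] := by decide
        rw [hpr]
        simp only [List.foldl]
        simp [Int.emod_emod_of_dvd _ dvd_rfl]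
      · obtain ⟨K, hQK⟩ : ∃ K, s.length / mn = K + 1 := ⟨s.length / mn - 1, by omega⟩
        rw [hQK]
        rw [show ((((K + 1 : Nat)) : Int) - 1) = (K : Int) from by push_cast; ring, Int.toNat_natCast]
        have hA := pv_loopA s (mn : Int) (10 ^ 9 + 7) hM K 1 0 0
        rw [Int.zero_emod] at hA
        rw [hA]
        try dsimp only
        simp only [PySem.Int.mod_eq_emod_of_pos hM]
        rw [pv_modstep]
        rw [show max ((K : Int)) 0 + 1 = (((K + 1 : Nat)) : Int) from by
          rw [max_eq_left (Int.natCast_nonneg K)]; push_cast; ring]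
        rw [PySem.List.pyRange_one]
        simp only [sub_zero, Int.toNat_natCast, List.foldl_map]
        try dsimp only
        simp only [zero_add]
        have hB := pv_loopB
          (fun t : Nat => (PySem.List.slice s (some ((t : Int) * (mn : Int))) (some (((t : Int) + 1) * (mn : Int)))).sum)
          (K + 1) 0 s.sum
        try dsimp only at hB
        rw [hB]
        try dsimp only
        simp only [zero_add, pv_slice_group, pv_slice_group', pv_slice_suffix]
        rw [show s.sum = pvSfx s 0 from by simp [pvSfx]]
        simp only [Finset.sum_range_sub']
        simp only [Nat.zero_mul, sub_sub_cancel]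
        congr 1
        rw [pv_abel (fun t => pvSfx s (t * mn)) K]
        rw [Finset.sum_congr rfl
          (fun t _ => by ring :
            ∀ t ∈ Finset.range K,
              (1 + (t : Int)) * (pvSfx s (t * mn) - pvSfx s ((t + 1) * mn))
                = ((t : Int) + 1) * (pvSfx s (t * mn) - pvSfx s ((t + 1) * mn)))]
        ring
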